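-- pv_equiv track=rewrite | github.com/limeorange/Programmers_Algorithm | 프로그래머스/2/42626. 더 맵게/더 맵게.py | solution
-- ===== SOURCE A (Python) =====
-- import heapq as hq
--
-- def solution(s, K):
--
--     answer = 0
--     hq.heapify(s)
--
--     while len(s) >= 2:
--
--         # 0번째 음식이 K 미만인 경우
--         if s[0] < K:
--             new_food = hq.heappop(s) + hq.heappop(s)*2
--             hq.heappush(s, new_food)
--             answer += 1
--
--         # 모든 음식이 K 이상인 경우
--         if s[0] >= K:
--             break
--
--     if s[0] < K:
--         return -1
--     else:
--         return answer
-- ===== SOURCE B (Python) =====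
-- def solution(s, K):
--     # Plain-list re-implementation: repeatedly remove the two smallest by min-scan.
--     t = list(s)
--     answer = 0
--     while len(t) >= 2 and min(t) < K:
--         a = min(t)
--         t.remove(a)
--         b = min(t)
--         t.remove(b)
--         t.append(a + 2 * b)
--         answer += 1
--     return -1 if min(t) < K else answer
-- ===== Notes on version B (the rewrite author's own statement) =====
-- stated objective: simpler
-- what changed: B drops heapq entirely: instead of maintaining a binary heap with sift-up/sift-down, it keeps a plain list and each round finds and removes the two smallest elements with min()/remove() scans, appending the combined value.
import Mathlib
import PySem

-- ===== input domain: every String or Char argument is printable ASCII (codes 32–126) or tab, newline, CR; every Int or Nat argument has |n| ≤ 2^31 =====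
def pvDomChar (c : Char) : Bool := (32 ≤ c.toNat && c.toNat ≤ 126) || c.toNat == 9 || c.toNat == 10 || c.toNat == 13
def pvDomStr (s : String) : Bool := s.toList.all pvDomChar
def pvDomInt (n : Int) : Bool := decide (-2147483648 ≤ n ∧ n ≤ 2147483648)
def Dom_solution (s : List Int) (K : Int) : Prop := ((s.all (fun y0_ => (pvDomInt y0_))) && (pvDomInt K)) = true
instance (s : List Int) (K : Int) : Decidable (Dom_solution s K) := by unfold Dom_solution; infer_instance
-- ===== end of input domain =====

-- B replaces the heapq binary heap by a plain list with min-scan/remove passes: simpler, no heap maintenance.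
-- Note: Python A heapifies its argument s in place (observable mutation); B leaves s untouched. The equivalence
-- proved here is about the RETURN value only.

-- ===== PORT A =====
-- A uses the heapq module; its functions (CPython's _siftdown, _siftup, heappush, heappop, heapify)
-- are transliterated below on List Int (array updates become List.set; heap.getD i 0 = heap[i], always in range).

-- heapq._siftdown(heap, startpos, pos) with newitem = heap[pos] passed explicitly (the final heap[pos] = newitem
-- is the List.set in each exit branch).
-- (structural recursion on a fuel bound: pos strictly decreases, so fuel = pos suffices;
-- the fuel only makes the recursion structural, it never cuts the computation short)
def pvSdF : Nat → List Int → Nat → Nat → Int → List Int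
  | 0, l, _, pos, x => l.set pos x
  | fuel+1, l, startpos, pos, x =>
    if startpos < pos then
      let parent := l.getD ((pos - 1) / 2) 0
      if x < parent then pvSdF fuel (l.set pos parent) startpos ((pos - 1) / 2) x
      else l.set pos x
    else l.set pos x

def pvSd (l : List Int) (startpos pos : Nat) (x : Int) : List Int := pvSdF pos l startpos pos x

-- the while-loop of heapq._siftup (move the smaller child up until a leaf); returns (array, final pos)
def pvSuLoopF : Nat → List Int → Nat → Nat → List Int × Nat
  | 0, l, pos, _ => (l, pos)
  | fuel+1, l, pos, endpos =>
    if 2*pos+1 < endpos then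
      if 2*pos+2 < endpos ∧ ¬ (l.getD (2*pos+1) 0 < l.getD (2*pos+2) 0) then
        pvSuLoopF fuel (l.set pos (l.getD (2*pos+2) 0)) (2*pos+2) endpos
      else
        pvSuLoopF fuel (l.set pos (l.getD (2*pos+1) 0)) (2*pos+1) endpos
    else (l, pos)

def pvSuLoop (l : List Int) (pos endpos : Nat) : List Int × Nat := pvSuLoopF endpos l pos endpos

-- heapq._siftup(heap, pos)
def pvSiftup (l : List Int) (pos : Nat) : List Int :=
  let newitem := l.getD pos 0
  let r := pvSuLoop l pos l.length
  pvSd r.1 pos r.2 newitem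

-- heapq.heappush
def pvHeappush (l : List Int) (x : Int) : List Int := pvSd (l ++ [x]) 0 l.length x

-- heapq.heappop (returns (popped value, new heap)); heap assumed nonempty at every call site
def pvHeappop (l : List Int) : Int × List Int :=
  let lastelt := l.getLast?.getD 0
  let rest := l.dropLast
  if rest.isEmpty then (lastelt, [])
  else (rest.getD 0 0, pvSiftup (rest.set 0 lastelt) 0)

-- heapq.heapify: for i in reversed(range(n//2)): _siftup(x, i)
def pvHeapify (l : List Int) : List Int :=
  ((List.range (l.length / 2)).reverse).foldl (fun h i => pvSiftup h i) l

-- the while-loop of A's solution (fuel = heap length: each combining round shrinks the heap by one)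
def pvLoopAF : Nat → Int → List Int → Int → Int × List Int
  | 0, _, heap, answer => (answer, heap)
  | fuel+1, K, heap, answer =>
    if 2 ≤ heap.length then
      if heap.getD 0 0 < K then
        let p1 := pvHeappop heap
        let p2 := pvHeappop p1.2
        let h3 := pvHeappush p2.2 (p1.1 + 2*p2.1)
        if h3.getD 0 0 ≥ K then (answer + 1, h3) else pvLoopAF fuel K h3 (answer + 1)
      else (answer, heap)
    else (answer, heap)

def pvLoopA (K : Int) (heap : List Int) (answer : Int) : Int × List Int :=
  pvLoopAF heap.length K heap answer

def solution (s : List Int) (K : Int) : Int :=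
  let h := pvHeapify s
  let r := pvLoopA K h 0
  if r.2.getD 0 0 < K then -1 else r.1

-- ===== PORT B =====
-- Source B's while-loop: two min-scan/remove passes per round (min(t) → PySem.List.min?, t.remove → PySem.List.remove?)

def pvLoopBF : Nat → Int → List Int → Int → Int
  | 0, K, t, answer => if (PySem.List.min? t (fun y => y)).getD 0 < K then -1 else answer
  | fuel+1, K, t, answer =>
    if 2 ≤ t.length ∧ (PySem.List.min? t (fun y => y)).getD 0 < K then
      let a := (PySem.List.min? t (fun y => y)).getD 0
      let t1 := (PySem.List.remove? t a).getD []
      let b := (PySem.List.min? t1 (fun y => y)).getD 0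
      let t2 := (PySem.List.remove? t1 b).getD []
      pvLoopBF fuel K (t2 ++ [a + 2*b]) (answer + 1)
    else if (PySem.List.min? t (fun y => y)).getD 0 < K then -1 else answer

def pvLoopB (K : Int) (t : List Int) (answer : Int) : Int := pvLoopBF t.length K t answer

def solution_alt (s : List Int) (K : Int) : Int := pvLoopB K s 0

-- ===== PRECONDITION & SPEC =====
-- Python A evaluates s[0] unconditionally (and B evaluates min(s)); both raise on an empty list.
def Pre_solution (s : List Int) (K : Int) : Prop := s ≠ []
instance (s : List Int) (K : Int) : Decidable (Pre_solution s K) := by unfold Pre_solution; infer_instance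
def pvWitness_solution : List Int × Int := ([1, 2, 3, 9, 10, 12], 7)

def Spec_solution (s : List Int) (K : Int) (out : Int) : Prop := out = solution_alt s K
instance (s : List Int) (K : Int) (out : Int) : Decidable (Spec_solution s K out) := by unfold Spec_solution; infer_instance

-- ===== CLAIM (what is proved, stated in full; the proofs are below) =====
def Claim_equal_solution : Prop := ∀ (s : List Int) (K : Int), Dom_solution s K → Pre_solution s K → Spec_solution s K (solution s K)

-- ===== LEMMAS AND PROOFS =====

-- length bookkeeping for the heap operations
theorem pvSdF_length (fuel : Nat) : ∀ (l : List Int) (s p : Nat) (x : Int),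
    (pvSdF fuel l s p x).length = l.length := by
  induction fuel with
  | zero => intro l s p x; simp [pvSdF]
  | succ n ihn => intro l s p x; simp only [pvSdF]; split_ifs <;> simp [ihn]

theorem pvSd_length (l : List Int) (s p : Nat) (x : Int) : (pvSd l s p x).length = l.length :=
  pvSdF_length p l s p x

theorem pvSuLoopF_length (fuel : Nat) : ∀ (l : List Int) (p e : Nat),
    (pvSuLoopF fuel l p e).1.length = l.length := by
  induction fuel with
  | zero => intro l p e; simp [pvSuLoopF]
  | succ n ihn => intro l p e; simp only [pvSuLoopF]; split_ifs <;> simp [ihn]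

theorem pvSuLoop_length (l : List Int) (p e : Nat) : (pvSuLoop l p e).1.length = l.length :=
  pvSuLoopF_length e l p e

theorem pvSiftup_length (l : List Int) (p : Nat) : (pvSiftup l p).length = l.length := by
  unfold pvSiftup; rw [pvSd_length, pvSuLoop_length]

theorem pvHeappush_length (l : List Int) (x : Int) : (pvHeappush l x).length = l.length + 1 := by
  unfold pvHeappush; rw [pvSd_length]; simp

theorem pvHeappop_length (l : List Int) (h : l ≠ []) : (pvHeappop l).2.length + 1 = l.length := by
  have hlen := List.length_pos_iff.mpr h
  unfold pvHeappop
  by_cases hr : l.dropLast.isEmpty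
  · rw [if_pos hr]
    have h0 : l.dropLast = [] := by simpa [List.isEmpty_iff] using hr
    have h1 : l.dropLast.length = 0 := by rw [h0]; rfl
    rw [List.length_dropLast] at h1
    simp only [List.length_nil]
    omega
  · rw [if_neg hr]
    simp only [pvSiftup_length, List.length_set, List.length_dropLast]
    omega


-- j lies in the subtree rooted at r of the implicit binary heap (indices: children of i are 2i+1, 2i+2)
def pvInSub (r j : Nat) : Prop := if _h : j ≤ r then r = j else pvInSub r ((j - 1) / 2)
  termination_by j
  decreasing_by omega

theorem pvInSub_iff (r j : Nat) : pvInSub r j ↔ (r = j ∨ (r < j ∧ pvInSub r ((j - 1) / 2))) := by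
  rw [pvInSub]
  split_ifs with h
  · constructor
    · intro he; left; exact he
    · rintro (he | ⟨hlt, _⟩); exact he; omega
  · constructor
    · intro hp; right; exact ⟨by omega, hp⟩
    · rintro (he | ⟨_, hp⟩); omega; exact hp

-- the heap property on the subtree rooted at r
def pvHeapOn (r : Nat) (l : List Int) : Prop :=
  ∀ i j, pvInSub r i → (j = 2*i+1 ∨ j = 2*i+2) → j < l.length → l.getD i 0 ≤ l.getD j 0

theorem pvInSub_refl (r : Nat) : pvInSub r r := by rw [pvInSub_iff]; left; rfl

theorem pvInSub_le {r j : Nat} (h : pvInSub r j) : r ≤ j := by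
  rw [pvInSub_iff] at h; rcases h with h | ⟨h, _⟩ <;> omega

theorem pvInSub_parent {r j : Nat} (h : pvInSub r j) (hne : j ≠ r) : pvInSub r ((j - 1) / 2) := by
  rw [pvInSub_iff] at h; rcases h with h | ⟨_, h⟩ <;> [omega; exact h]

theorem pvInSub_child {r p j : Nat} (h : pvInSub r p) (hj : j = 2*p+1 ∨ j = 2*p+2) : pvInSub r j := by
  have hp := pvInSub_le h
  rw [pvInSub_iff]
  right
  constructor
  · omega
  · have : (j - 1) / 2 = p := by omega
    rw [this]; exact h

theorem pvInSub_zero (j : Nat) : pvInSub 0 j := by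
  induction j using Nat.strong_induction_on with
  | _ j ih =>
    rcases Nat.eq_zero_or_pos j with h | h
    · subst h; exact pvInSub_refl 0
    · rw [pvInSub_iff]; right; exact ⟨h, ih _ (by omega)⟩

theorem pvInSub_trans {a b c : Nat} (h1 : pvInSub a b) (h2 : pvInSub b c) : pvInSub a c := by
  induction c using Nat.strong_induction_on with
  | _ c ih =>
    rw [pvInSub_iff] at h2
    rcases h2 with h2 | ⟨hlt, h2⟩
    · subst h2; exact h1
    · rw [pvInSub_iff]
      have := pvInSub_le h1
      right
      exact ⟨by omega, ih _ (by omega) h2⟩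

theorem pvInSub_split {k i : Nat} (h : pvInSub k i) (hne : i ≠ k) :
    pvInSub (2*k+1) i ∨ pvInSub (2*k+2) i := by
  induction i using Nat.strong_induction_on with
  | _ i ih =>
    have hk := pvInSub_le h
    have hp := pvInSub_parent h hne
    by_cases hpc : (i - 1) / 2 = k
    · have : i = 2*k+1 ∨ i = 2*k+2 := by omega
      rcases this with h' | h' <;> [left; right] <;> (rw [h']; exact pvInSub_refl _)
    · have hrec := ih _ (by omega) hp hpc
      have hchild : i = 2*((i-1)/2)+1 ∨ i = 2*((i-1)/2)+2 := by omega
      rcases hrec with h' | h' <;> [left; right] <;> exact pvInSub_child h' hchild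

theorem pvInSub_linear {r k i : Nat} (h1 : pvInSub r i) (h2 : pvInSub k i) (hkr : k ≤ r) :
    pvInSub k r := by
  induction i using Nat.strong_induction_on with
  | _ i ih =>
    by_cases he : i = r
    · subst he; exact h2
    · have hr := pvInSub_le h1
      have hk := pvInSub_le h2
      by_cases he2 : i = k
      · omega
      · exact ih _ (by omega) (pvInSub_parent h1 he) (pvInSub_parent h2 he2)

-- getD/set bookkeeping
theorem pvGetD_set_self (l : List Int) (i : Nat) (x : Int) (h : i < l.length) :
    (l.set i x).getD i 0 = x := by
  simp [List.getD_eq_getElem?_getD, h]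

theorem pvGetD_set_ne (l : List Int) (i j : Nat) (x : Int) (h : i ≠ j) :
    (l.set i x).getD j 0 = l.getD j 0 := by
  simp [List.getD_eq_getElem?_getD, List.getElem?_set_ne h]

theorem pvSet_getD_self (l : List Int) (i : Nat) (h : i < l.length) :
    l.set i (l.getD i 0) = l := by
  simp [List.getD_eq_getElem?_getD, List.getElem?_eq_getElem h, List.set_getElem_self]

theorem pvCount_set (l : List Int) (i : Nat) (x y : Int) (h : i < l.length) :
    (l.set i x).count y + (if l.getD i 0 = y then 1 else 0) =
      l.count y + (if x = y then 1 else 0) := by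
  induction l generalizing i with
  | nil => simp at h
  | cons a t ih =>
    cases i with
    | zero =>
      simp only [List.set_cons_zero, List.count_cons, List.getD_cons_zero, beq_iff_eq]
      split_ifs <;> simp_all
    | succ n =>
      simp only [List.set_cons_succ, List.count_cons, List.getD_cons_succ, beq_iff_eq]
      have := ih n (by simpa using h)
      split_ifs at this ⊢ <;> omega

theorem pvHoleStep (l : List Int) (i j : Nat) (x : Int) (hi : i < l.length) (hj : j < l.length)
    (hne : i ≠ j) : ((l.set j (l.getD i 0)).set i x).Perm (l.set j x) := by
  rw [List.perm_iff_count]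
  intro y
  have h1 := pvCount_set (l.set j (l.getD i 0)) i x y (by simpa using hi)
  have h2 := pvCount_set l j (l.getD i 0) y hj
  have h3 := pvCount_set l j x y hj
  rw [pvGetD_set_ne l j i _ (by omega)] at h1
  split_ifs at h1 h2 h3 <;> omega

theorem pvRoot_min {l : List Int} (h : pvHeapOn 0 l) :
    ∀ j, j < l.length → l.getD 0 0 ≤ l.getD j 0 := by
  intro j
  induction j using Nat.strong_induction_on with
  | _ j ih =>
    intro hj
    rcases Nat.eq_zero_or_pos j with h0 | h0
    · simp [h0]
    · have hedge := h ((j-1)/2) j (pvInSub_zero _) (by omega) hj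
      have := ih ((j-1)/2) (by omega) (by omega)
      omega

theorem pvHeapOn_leaf {l : List Int} {r : Nat} (h : l.length ≤ 2*r+1) : pvHeapOn r l := by
  intro i j hi hj hlen
  have := pvInSub_le hi
  omega

theorem pvHeapOn_mono {l : List Int} {r r' : Nat} (h : pvHeapOn r l) (hs : pvInSub r r') :
    pvHeapOn r' l := fun i j hi hj hlen => h i j (pvInSub_trans hs hi) hj hlen

-- correctness of pvSd (bubble-up with a hole): see design notes in the proofs below
theorem pvSdF_spec (s : Nat) (x : Int) (fuel : Nat) : ∀ (l : List Int) (pos : Nat),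
    pos ≤ fuel → pos < l.length → pvInSub s pos →
    (∀ i j, pvInSub s i → (j = 2*i+1 ∨ j = 2*i+2) → j < l.length → j ≠ pos →
      (l.set pos x).getD i 0 ≤ (l.set pos x).getD j 0) →
    (pos ≠ s → ∀ j, (j = 2*pos+1 ∨ j = 2*pos+2) → j < l.length →
      l.getD ((pos-1)/2) 0 ≤ l.getD j 0) →
    pvHeapOn s (pvSdF fuel l s pos x) ∧ (pvSdF fuel l s pos x).Perm (l.set pos x) ∧
      (∀ j, ¬ pvInSub s j → (pvSdF fuel l s pos x).getD j 0 = l.getD j 0) := by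
  induction fuel with
  | zero =>
    intro l pos hfuel hpos hsub ha hb
    -- fuel 0 forces pos = 0, hence pos = s: the stop case
    have hps : pos = s := by have := pvInSub_le hsub; omega
    simp only [pvSdF]
    refine ⟨?_, List.Perm.refl _, ?_⟩
    · intro i j hi hj hlen
      simp only [List.length_set] at hlen
      have := pvInSub_le hi
      exact ha i j hi hj hlen (by omega)
    · intro j hj
      exact pvGetD_set_ne l pos j x (by intro hc; exact hj (hc ▸ hsub))
  | succ fuel ih =>
  intro l pos hfuel hpos hsub ha hb
  simp only [pvSdF]
  by_cases h1 : s < pos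
  · rw [if_pos h1]
    by_cases h2 : x < l.getD ((pos-1)/2) 0
    · rw [if_pos h2]
      -- recursive step: the hole moves to the parent
      set pp := (pos-1)/2 with hpp
      have hppos : pp < pos := by omega
      have hpplen : pp < l.length := by omega
      have hne : pp ≠ pos := by omega
      have hsub' : pvInSub s pp := pvInSub_parent hsub (by omega)
      -- key getD facts on l' := l.set pos (l.getD pp 0)
      have hLpp : (l.set pos (l.getD pp 0)).getD pp 0 = l.getD pp 0 :=
        pvGetD_set_ne l pos pp _ (by omega)
      have hLpos : (l.set pos (l.getD pp 0)).getD pos 0 = l.getD pp 0 :=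
        pvGetD_set_self l pos _ hpos
      have hMpos : (l.set pos x).getD pos 0 = x := pvGetD_set_self l pos x hpos
      have hchild_parent : ∀ i j : Nat, (j = 2*i+1 ∨ j = 2*i+2) → i = (j-1)/2 := by
        intro i j hj; omega
      have hmain := ih (l.set pos (l.getD pp 0)) pp
        (by omega) (by simpa using hpplen) hsub'
        (by -- ha for the recursive call
          intro i j hi hj hjlen hjne
          simp only [List.length_set] at hjlen
          have hile := pvInSub_le hi
          by_cases hjpos : j = pos
          · -- then i = pp and the required edge is x ≤ l[pp]
            have : i = pp := by have := hchild_parent i j hj; omega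
            subst this; rw [hjpos]
            rw [pvGetD_set_self _ pp x (by simpa using hpplen),
              pvGetD_set_ne _ pp pos x hne, hLpos]
            omega
          · have hjval : ((l.set pos (l.getD pp 0)).set pp x).getD j 0 = l.getD j 0 := by
              rw [pvGetD_set_ne _ pp j x (by omega), pvGetD_set_ne l pos j _ (by omega)]
            by_cases hipp : i = pp
            · subst hipp
              rw [pvGetD_set_self _ pp x (by simpa using hpplen), hjval]
              have := ha pp j hsub' hj hjlen hjpos
              rw [pvGetD_set_ne l pos pp x (by omega), pvGetD_set_ne l pos j x (by omega)] at this
              omega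
            · by_cases hipos : i = pos
              · rw [hipos]
                rw [pvGetD_set_ne _ pp pos x hne, hLpos, hjval]
                have hps : pos ≠ s := by omega
                exact hb hps j (hipos ▸ hj) hjlen
              · rw [pvGetD_set_ne _ pp i x (by omega), pvGetD_set_ne l pos i _ (by omega), hjval]
                have := ha i j hi hj hjlen hjpos
                rw [pvGetD_set_ne l pos i x (by omega), pvGetD_set_ne l pos j x (by omega)] at this
                omega)
        (by -- hb for the recursive call
          intro hpps j hj hjlen
          simp only [List.length_set] at hjlen
          have hsle : s ≤ pp := pvInSub_le hsub'
          have hpp1 : 1 ≤ pp := by omega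
          set gp := (pp-1)/2 with hgp
          have hgplt : gp < pp := by omega
          have hgpne : gp ≠ pos := by omega
          have hgpval : (l.set pos (l.getD pp 0)).getD gp 0 = l.getD gp 0 :=
            pvGetD_set_ne l pos gp _ (by omega)
          have hsubgp : pvInSub s gp := pvInSub_parent hsub' hpps
          have hppchild : pp = 2*gp+1 ∨ pp = 2*gp+2 := by omega
          have hgp_pp : l.getD gp 0 ≤ l.getD pp 0 := by
            have := ha gp pp hsubgp hppchild hpplen hne
            rw [pvGetD_set_ne l pos gp x (by omega), pvGetD_set_ne l pos pp x (by omega)] at this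
            exact this
          rw [hgpval]
          by_cases hjpos : j = pos
          · rw [hjpos, hLpos]; exact hgp_pp
          · rw [pvGetD_set_ne l pos j _ (by omega)]
            have := ha pp j hsub' hj hjlen hjpos
            rw [pvGetD_set_ne l pos pp x (by omega), pvGetD_set_ne l pos j x (by omega)] at this
            omega)
      refine ⟨hmain.1, ?_, ?_⟩
      · exact hmain.2.1.trans (pvHoleStep l pp pos x hpplen hpos hne)
      · intro j hj
        rw [hmain.2.2 j hj, pvGetD_set_ne l pos j _
          (by intro hc; exact hj (hc ▸ hsub))]
    · -- x ≥ parent: stop here, result is l.set pos x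
      rw [if_neg h2]
      refine ⟨?_, List.Perm.refl _, ?_⟩
      · intro i j hi hj hlen
        simp only [List.length_set] at hlen
        by_cases hjpos : j = pos
        · have hieq : i = (pos-1)/2 := by rcases hj with hj | hj <;> omega
          subst hieq; rw [hjpos]
          rw [pvGetD_set_self l pos x hpos, pvGetD_set_ne l pos _ x (by omega)]
          omega
        · exact ha i j hi hj hlen hjpos
      · intro j hj
        exact pvGetD_set_ne l pos j x (by intro hc; exact hj (hc ▸ hsub))
  · -- pos = s: result is l.set pos x, every required edge is in ha
    rw [if_neg h1]
    have hps : pos = s := by have := pvInSub_le hsub; omega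
    refine ⟨?_, List.Perm.refl _, ?_⟩
    · intro i j hi hj hlen
      simp only [List.length_set] at hlen
      have := pvInSub_le hi
      exact ha i j hi hj hlen (by omega)
    · intro j hj
      exact pvGetD_set_ne l pos j x (by intro hc; exact hj (hc ▸ hsub))

theorem pvSd_spec (l : List Int) (s pos : Nat) (x : Int) (hpos : pos < l.length)
    (hsub : pvInSub s pos)
    (ha : ∀ i j, pvInSub s i → (j = 2*i+1 ∨ j = 2*i+2) → j < l.length → j ≠ pos →
      (l.set pos x).getD i 0 ≤ (l.set pos x).getD j 0)
    (hb : pos ≠ s → ∀ j, (j = 2*pos+1 ∨ j = 2*pos+2) → j < l.length →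
      l.getD ((pos-1)/2) 0 ≤ l.getD j 0) :
    pvHeapOn s (pvSd l s pos x) ∧ (pvSd l s pos x).Perm (l.set pos x) ∧
      (∀ j, ¬ pvInSub s j → (pvSd l s pos x).getD j 0 = l.getD j 0) :=
  pvSdF_spec s x pos l pos (le_refl _) hpos hsub ha hb

theorem pvSuLoop_spec (r : Nat) : ∀ (fuel : Nat) (l : List Int) (pos endpos : Nat),
    endpos = l.length → endpos - pos ≤ fuel → pos < endpos → pvInSub r pos →
    (∀ i j, pvInSub r i → (j = 2*i+1 ∨ j = 2*i+2) → j < endpos → i ≠ pos → j ≠ pos →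
      l.getD i 0 ≤ l.getD j 0) →
    (pos ≠ r → ∀ j, (j = 2*pos+1 ∨ j = 2*pos+2) → j < endpos →
      l.getD ((pos-1)/2) 0 ≤ l.getD j 0) →
    (pvSuLoopF fuel l pos endpos).2 < endpos ∧ pvInSub r (pvSuLoopF fuel l pos endpos).2 ∧
      endpos ≤ 2*(pvSuLoopF fuel l pos endpos).2+1 ∧ (pvSuLoopF fuel l pos endpos).1.length = l.length ∧
      (∀ i j, pvInSub r i → (j = 2*i+1 ∨ j = 2*i+2) → j < endpos →
        i ≠ (pvSuLoopF fuel l pos endpos).2 → j ≠ (pvSuLoopF fuel l pos endpos).2 →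
        (pvSuLoopF fuel l pos endpos).1.getD i 0 ≤ (pvSuLoopF fuel l pos endpos).1.getD j 0) ∧
      (∀ y : Int, ((pvSuLoopF fuel l pos endpos).1.set (pvSuLoopF fuel l pos endpos).2 y).Perm (l.set pos y)) ∧
      (∀ j, ¬ pvInSub r j → (pvSuLoopF fuel l pos endpos).1.getD j 0 = l.getD j 0) := by
  intro fuel
  induction fuel with
  | zero => intro l pos endpos hend hfuel hpos _ _ _; omega
  | succ n ihf =>
    intro l pos endpos hend hfuel hpos hsub ha hc
    simp only [pvSuLoopF]
    by_cases hlt : 2*pos+1 < endpos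
    · rw [if_pos hlt]
      -- choose the smaller child c, as CPython does
      have hstep : ∀ c : Nat, (c = 2*pos+1 ∨ c = 2*pos+2) → c < endpos →
          (∀ d, (d = 2*pos+1 ∨ d = 2*pos+2) → d < endpos → l.getD c 0 ≤ l.getD d 0) →
          (pvSuLoopF n (l.set pos (l.getD c 0)) c endpos).2 < endpos ∧
            pvInSub r (pvSuLoopF n (l.set pos (l.getD c 0)) c endpos).2 ∧
            endpos ≤ 2*(pvSuLoopF n (l.set pos (l.getD c 0)) c endpos).2+1 ∧
            (pvSuLoopF n (l.set pos (l.getD c 0)) c endpos).1.length = l.length ∧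
            (∀ i j, pvInSub r i → (j = 2*i+1 ∨ j = 2*i+2) → j < endpos →
              i ≠ (pvSuLoopF n (l.set pos (l.getD c 0)) c endpos).2 →
              j ≠ (pvSuLoopF n (l.set pos (l.getD c 0)) c endpos).2 →
              (pvSuLoopF n (l.set pos (l.getD c 0)) c endpos).1.getD i 0 ≤
                (pvSuLoopF n (l.set pos (l.getD c 0)) c endpos).1.getD j 0) ∧
            (∀ y : Int, ((pvSuLoopF n (l.set pos (l.getD c 0)) c endpos).1.set
              (pvSuLoopF n (l.set pos (l.getD c 0)) c endpos).2 y).Perm (l.set pos y)) ∧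
            (∀ j, ¬ pvInSub r j →
              (pvSuLoopF n (l.set pos (l.getD c 0)) c endpos).1.getD j 0 = l.getD j 0) := by
        intro c hcc hclt hcmin
        have hcpos : pos < c := by omega
        have hclen : c < l.length := by omega
        have hplen : pos < l.length := by omega
        have ihr := ihf (l.set pos (l.getD c 0)) c endpos
          (by simpa using hend) (by omega) hclt (pvInSub_child hsub hcc)
          (by -- edges away from the new hole c
            intro i j hi hj hjlt hine hjne
            by_cases hjpos : j = pos
            · -- pos is now filled with l[c]; its parent i is bounded by hc
              have hile := pvInSub_le hi
              have hieq : i = (pos-1)/2 := by rcases hj with hj | hj <;> omega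
              have hpr : pos ≠ r := by omega
              have hipos : i ≠ pos := by omega
              rw [hjpos, pvGetD_set_self l pos _ hplen, pvGetD_set_ne l pos i _ (by omega), hieq]
              exact hc hpr c hcc hclt
            · rw [pvGetD_set_ne l pos j _ (by omega)]
              by_cases hipos : i = pos
              · rw [hipos, pvGetD_set_self l pos _ hplen]
                exact hcmin j (hipos ▸ hj) hjlt
              · rw [pvGetD_set_ne l pos i _ (by omega)]
                exact ha i j hi hj hjlt hipos hjpos)
          (by -- parent-of-hole bound for the new hole c
            intro _ d hd hdlt
            have hdpos : d ≠ pos := by omega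
            have hdc : d ≠ c := by omega
            have hcp : (c-1)/2 = pos := by omega
            rw [hcp, pvGetD_set_self l pos _ hplen, pvGetD_set_ne l pos d _ (by omega)]
            exact ha c d (pvInSub_child hsub hcc) (by omega) hdlt (by omega) hdpos)
        refine ⟨ihr.1, ihr.2.1, ihr.2.2.1, by simpa using ihr.2.2.2.1, ihr.2.2.2.2.1, ?_, ?_⟩
        · intro y
          exact (ihr.2.2.2.2.2.1 y).trans (pvHoleStep l c pos y hclen hplen (by omega))
        · intro j hj
          rw [ihr.2.2.2.2.2.2 j hj, pvGetD_set_ne l pos j _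
            (by intro hcon; exact hj (hcon ▸ hsub))]
      by_cases h2 : 2*pos+2 < endpos ∧ ¬ (l.getD (2*pos+1) 0 < l.getD (2*pos+2) 0)
      · rw [if_pos h2]
        exact hstep (2*pos+2) (Or.inr rfl) h2.1
          (by rintro d (hd | hd) hdlt <;> subst hd <;> [omega; exact le_refl _])
      · rw [if_neg h2]
        exact hstep (2*pos+1) (Or.inl rfl) hlt
          (by rintro d (hd | hd) hdlt <;> subst hd
              · exact le_refl _
              · by_cases hord : l.getD (2*pos+1) 0 < l.getD (2*pos+2) 0
                · omega
                · exact absurd ⟨hdlt, hord⟩ h2)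
    · rw [if_neg hlt]
      refine ⟨hpos, hsub, by omega, by trivial, ?_, ?_, ?_⟩
      · exact fun i j hi hj hjlt hine hjne => ha i j hi hj hjlt hine hjne
      · exact fun y => List.Perm.refl _
      · exact fun j _ => by trivial

theorem pvSiftup_spec (l : List Int) (r : Nat) (hr : r < l.length)
    (hsub : ∀ i j, pvInSub r i → i ≠ r → (j = 2*i+1 ∨ j = 2*i+2) → j < l.length →
      l.getD i 0 ≤ l.getD j 0) :
    pvHeapOn r (pvSiftup l r) ∧ (pvSiftup l r).Perm l ∧
      (∀ j, ¬ pvInSub r j → (pvSiftup l r).getD j 0 = l.getD j 0) := by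
  have hsu := pvSuLoop_spec r l.length l r l.length rfl (by omega) hr (pvInSub_refl r)
    (fun i j hi hj hjlt hine _ => hsub i j hi hine hj hjlt)
    (fun hrr => absurd rfl hrr)
  obtain ⟨he2, hesub, hleaf, helen, hedges, hperm, hunch⟩ := hsu
  have hsd := pvSd_spec (pvSuLoopF l.length l r l.length).1 r (pvSuLoopF l.length l r l.length).2 (l.getD r 0)
    (by omega) hesub
    (by
      intro i j hi hj hjlt hjne
      rw [helen] at hjlt
      by_cases hie : i = (pvSuLoopF l.length l r l.length).2
      · -- the final hole is a leaf: it has no children in range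
        rcases hj with hj | hj <;> omega
      · rw [pvGetD_set_ne _ _ i _ (by omega), pvGetD_set_ne _ _ j _ (by omega)]
        exact hedges i j hi hj hjlt hie hjne)
    (by intro _ j hj hjlt; rw [helen] at hjlt; omega)
  obtain ⟨hh, hp, hu⟩ := hsd
  have hgoal : pvSiftup l r =
      pvSd (pvSuLoopF l.length l r l.length).1 r (pvSuLoopF l.length l r l.length).2 (l.getD r 0) := rfl
  rw [hgoal]
  refine ⟨hh, ?_, ?_⟩
  · exact hp.trans ((hperm (l.getD r 0)).trans (by rw [pvSet_getD_self l r hr]))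
  · intro j hj
    rw [hu j hj, hunch j hj]

theorem pvHeapifyAux (L : Nat) : ∀ (k : Nat) (h : List Int), h.length = L → k ≤ L / 2 →
    (∀ r, k ≤ r → pvHeapOn r h) →
    pvHeapOn 0 ((List.range k).reverse.foldl (fun a i => pvSiftup a i) h) ∧
      ((List.range k).reverse.foldl (fun a i => pvSiftup a i) h).Perm h := by
  intro k
  induction k with
  | zero => intro h _ _ hall; exact ⟨hall 0 (by omega), List.Perm.refl _⟩
  | succ k ihk =>
    intro h hlen hk hall
    have hkl : k < h.length := by omega
    have hs := pvSiftup_spec h k hkl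
      (by
        intro i j hi hine hj hjlt
        rcases pvInSub_split hi hine with hsp | hsp
        · exact hall (2*k+1) (by omega) i j hsp hj hjlt
        · exact hall (2*k+2) (by omega) i j hsp hj hjlt)
    obtain ⟨hhk, hperm, hunch⟩ := hs
    have hstep : (List.range (k+1)).reverse = k :: (List.range k).reverse := by
      simp [List.range_succ]
    rw [hstep, List.foldl_cons]
    have ihr := ihk (pvSiftup h k) (by rw [pvSiftup_length]; exact hlen) (by omega)
      (by
        intro r hr
        by_cases hrk : r = k
        · exact hrk ▸ hhk
        · by_cases hin : pvInSub k r
          · exact pvHeapOn_mono hhk hin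
          · intro i j hi hj hjlt
            have hjlen : j < h.length := by rwa [pvSiftup_length] at hjlt
            have hnii : ¬ pvInSub k i := fun hc =>
              hin (pvInSub_linear hi hc (by omega))
            have hnij : ¬ pvInSub k j := fun hc =>
              hin (pvInSub_linear (pvInSub_child hi hj) hc (by omega))
            rw [hunch i hnii, hunch j hnij]
            exact hall r (by omega) i j hi hj hjlen)
    exact ⟨ihr.1, ihr.2.trans hperm⟩

theorem pvHeapify_spec (l : List Int) :
    pvHeapOn 0 (pvHeapify l) ∧ (pvHeapify l).Perm l := by
  have := pvHeapifyAux l.length (l.length / 2) l rfl (le_refl _)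
    (fun r hr => pvHeapOn_leaf (by omega))
  exact this

theorem pvGetD_eq_getElem (l : List Int) (j : Nat) (h : j < l.length) : l.getD j 0 = l[j] := by
  simp [List.getD_eq_getElem?_getD, List.getElem?_eq_getElem h]

theorem pvGetD_append_left (l : List Int) (x : Int) (i : Nat) (h : i < l.length) :
    (l ++ [x]).getD i 0 = l.getD i 0 := by
  rw [pvGetD_eq_getElem _ i (by simp; omega), pvGetD_eq_getElem _ i h,
    List.getElem_append_left h]

theorem pvGetD_append_self (l : List Int) (x : Int) :
    (l ++ [x]).getD l.length 0 = x := by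
  rw [pvGetD_eq_getElem _ _ (by simp)]
  simp

theorem pvGetD_dropLast (l : List Int) (i : Nat) (h : i < l.dropLast.length) :
    l.dropLast.getD i 0 = l.getD i 0 := by
  have h' : i < l.length := by rw [List.length_dropLast] at h; omega
  rw [pvGetD_eq_getElem _ i h, pvGetD_eq_getElem _ i h', List.getElem_dropLast]

theorem pvHeappush_spec (l : List Int) (x : Int) (h : pvHeapOn 0 l) :
    pvHeapOn 0 (pvHeappush l x) ∧ (pvHeappush l x).Perm (x :: l) := by
  have hself : (l ++ [x]).set l.length x = l ++ [x] := by
    have := pvSet_getD_self (l ++ [x]) l.length (by simp)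
    rwa [pvGetD_append_self] at this
  have hsd := pvSd_spec (l ++ [x]) 0 l.length x (by simp) (pvInSub_zero _)
    (by
      intro i j hi hj hjlt hjne
      rw [hself]
      simp only [List.length_append, List.length_cons, List.length_nil] at hjlt
      have hij : i = (j-1)/2 := by rcases hj with hj | hj <;> omega
      have hjl : j < l.length := by omega
      have hil : i < l.length := by omega
      rw [pvGetD_append_left l x i hil, pvGetD_append_left l x j hjl]
      exact h i j (pvInSub_zero i) hj hjl)
    (by intro _ j hj hjlt; simp only [List.length_append, List.length_cons, List.length_nil] at hjlt; omega)
  obtain ⟨hh, hp, _⟩ := hsd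
  refine ⟨hh, ?_⟩
  rw [hself] at hp
  exact hp.trans (List.perm_append_singleton x l)

theorem pvHeappop_spec (l : List Int) (hne : l ≠ []) (h : pvHeapOn 0 l) :
    pvHeapOn 0 (pvHeappop l).2 ∧ ((pvHeappop l).1 :: (pvHeappop l).2).Perm l ∧
      (∀ y ∈ l, (pvHeappop l).1 ≤ y) := by
  have hroot : ∀ y ∈ l, l.getD 0 0 ≤ y := by
    intro y hy
    obtain ⟨j, hj, rfl⟩ := List.mem_iff_getElem.mp hy
    rw [← pvGetD_eq_getElem l j hj]
    exact pvRoot_min h j hj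
  by_cases he : l.dropLast.isEmpty
  · obtain ⟨a, rfl⟩ : ∃ a, l = [a] := by
      have h0 : l.dropLast = [] := by simpa [List.isEmpty_iff] using he
      have h1 := List.length_pos_iff.mpr hne
      have h2 : l.dropLast.length = 0 := by rw [h0]; rfl
      rw [List.length_dropLast] at h2
      exact List.length_eq_one_iff.mp (by omega)
    refine ⟨?_, ?_, ?_⟩
    · intro i j _ hj hjlt
      simp only [pvHeappop, List.dropLast_singleton, List.isEmpty_nil, if_true] at hjlt ⊢
      simp at hjlt
    · simp [pvHeappop]
    · intro y hy
      simp only [List.mem_singleton] at hy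
      simp [pvHeappop, hy]
  · have hrlen : 0 < l.dropLast.length := by
      cases hq : l.dropLast with
      | nil => rw [hq] at he; simp at he
      | cons a t => simp
    have hrlast : l.dropLast.length + 1 = l.length := by
      rw [List.length_dropLast]
      have := List.length_pos_iff.mpr hne
      omega
    have hres : pvHeappop l =
        (l.dropLast.getD 0 0, pvSiftup (l.dropLast.set 0 (l.getLast?.getD 0)) 0) := by
      rw [pvHeappop, if_neg he]
    have hsu := pvSiftup_spec (l.dropLast.set 0 (l.getLast?.getD 0)) 0 (by simpa using hrlen)
      (by
        intro i j hi hine hj hjlt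
        simp only [List.length_set] at hjlt
        have hi0 : 0 < i := by have := pvInSub_le hi; omega
        have hj0 : j ≠ 0 := by omega
        rw [pvGetD_set_ne _ 0 i _ (by omega), pvGetD_set_ne _ 0 j _ (by omega),
          pvGetD_dropLast l i (by omega), pvGetD_dropLast l j (by omega)]
        exact h i j (pvInSub_zero i) hj (by omega))
    obtain ⟨hh, hp, _⟩ := hsu
    rw [hres]
    refine ⟨hh, ?_, ?_⟩
    · -- r :: siftup(rest.set 0 last) ~ r :: last :: tail(rest) ~ rest ++ [last] = l
      have hl : l.dropLast ++ [l.getLast hne] = l := List.dropLast_concat_getLast hne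
      have hlast : l.getLast?.getD 0 = l.getLast hne := by
        rw [List.getLast?_eq_some_getLast hne]; rfl
      obtain ⟨r0, t, hrt⟩ : ∃ r0 t, l.dropLast = r0 :: t := by
        cases hq : l.dropLast with
        | nil => rw [hq] at hrlen; simp at hrlen
        | cons a t => exact ⟨a, t, rfl⟩
      refine (List.Perm.cons _ hp).trans ?_
      rw [hrt, List.set_cons_zero, List.getD_cons_zero]
      have hle : l = r0 :: (t ++ [l.getLast?.getD 0]) := by
        conv_lhs => rw [← hl]
        rw [hrt, ← hlast]
        rfl
      conv_rhs => rw [hle]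
      exact List.Perm.cons r0 (List.perm_append_singleton _ t).symm
    · intro y hy
      have : l.dropLast.getD 0 0 = l.getD 0 0 := pvGetD_dropLast l 0 hrlen
      rw [this]
      exact hroot y hy

-- min(t) over a permutation of a heap is the heap's root
theorem pvMin_eq_root {l t : List Int} (hp : l.Perm t) (hne : l ≠ []) (h : pvHeapOn 0 l) :
    (PySem.List.min? t (fun y => y)).getD 0 = l.getD 0 0 := by
  have htne : t ≠ [] := by
    intro hc; exact hne (List.perm_nil.mp (hc ▸ hp))
  cases hm : PySem.List.min? t (fun y => y) with
  | none => exact absurd ((PySem.List.min?_eq_none_iff t _).mp hm) htne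
  | some m =>
    have hmem : m ∈ l := hp.mem_iff.mpr (PySem.List.min?_mem hm)
    have hrootmem : l.getD 0 0 ∈ t := by
      have h0 : 0 < l.length := List.length_pos_iff.mpr hne
      rw [pvGetD_eq_getElem l 0 h0]
      exact hp.mem_iff.mp (List.getElem_mem h0)
    have h1 : m ≤ l.getD 0 0 := PySem.List.min?_isMin hm _ hrootmem
    have h2 : l.getD 0 0 ≤ m := by
      obtain ⟨j, hj, rfl⟩ := List.mem_iff_getElem.mp hmem
      rw [← pvGetD_eq_getElem l j hj]
      exact pvRoot_min h j hj
    simp only [Option.getD_some]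
    omega

-- proof-side abbreviations for the two loop bodies
def pvMinv (t : List Int) : Int := (PySem.List.min? t (fun y => y)).getD 0
def pvRem (t : List Int) (v : Int) : List Int := (PySem.List.remove? t v).getD []
def pvNextB (t : List Int) : List Int :=
  pvRem (pvRem t (pvMinv t)) (pvMinv (pvRem t (pvMinv t))) ++
    [pvMinv t + 2 * pvMinv (pvRem t (pvMinv t))]
def pvNextA (heap : List Int) : List Int :=
  pvHeappush (pvHeappop (pvHeappop heap).2).2
    ((pvHeappop heap).1 + 2 * (pvHeappop (pvHeappop heap).2).1)

theorem pvMinv_eq_root {l t : List Int} (hp : l.Perm t) (hne : l ≠ []) (h : pvHeapOn 0 l) :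
    pvMinv t = l.getD 0 0 := pvMin_eq_root hp hne h

theorem pvLoopA_eq (fuel : Nat) (K : Int) (heap : List Int) (answer : Int) :
    pvLoopAF (fuel+1) K heap answer =
      if 2 ≤ heap.length then
        if heap.getD 0 0 < K then
          if (pvNextA heap).getD 0 0 ≥ K then (answer + 1, pvNextA heap)
          else pvLoopAF fuel K (pvNextA heap) (answer + 1)
        else (answer, heap)
      else (answer, heap) := rfl

theorem pvLoopB_eq (fuel : Nat) (K : Int) (t : List Int) (answer : Int) :
    pvLoopBF (fuel+1) K t answer =
      if 2 ≤ t.length ∧ pvMinv t < K then pvLoopBF fuel K (pvNextB t) (answer + 1)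
      else if pvMinv t < K then -1 else answer := rfl

-- one combining round: the heap pop/pop/push and the min-scan remove/remove/append
-- produce permuted states, and the two combined values agree
theorem pvRound {heap t : List Int} (hlen2 : 2 ≤ heap.length) (hh : pvHeapOn 0 heap)
    (hperm : heap.Perm t) :
    pvHeapOn 0 (pvNextA heap) ∧ (pvNextA heap).Perm (pvNextB t) ∧
      (pvNextA heap).length + 1 = heap.length := by
  have hne : heap ≠ [] := by intro hc; rw [hc] at hlen2; simp at hlen2
  obtain ⟨hh1, hperm1, hmin1⟩ := pvHeappop_spec heap hne hh
  have hlen1 : (pvHeappop heap).2.length + 1 = heap.length := pvHeappop_length heap hne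
  have hne1 : (pvHeappop heap).2 ≠ [] := by
    intro hc; rw [hc] at hlen1; simp at hlen1; omega
  obtain ⟨hh2, hperm2, hmin2⟩ := pvHeappop_spec (pvHeappop heap).2 hne1 hh1
  have hlen2' : (pvHeappop (pvHeappop heap).2).2.length + 1 = (pvHeappop heap).2.length :=
    pvHeappop_length _ hne1
  obtain ⟨hh3, hperm3⟩ := pvHeappush_spec (pvHeappop (pvHeappop heap).2).2
    ((pvHeappop heap).1 + 2 * (pvHeappop (pvHeappop heap).2).1) hh2
  have hmemroot : (pvHeappop heap).1 ∈ heap :=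
    hperm1.mem_iff.mp List.mem_cons_self
  have hroot : heap.getD 0 0 ∈ heap := by
    have h0 : 0 < heap.length := by omega
    rw [pvGetD_eq_getElem heap 0 h0]; exact List.getElem_mem h0
  have hmr : ∀ y ∈ heap, heap.getD 0 0 ≤ y := by
    intro y hy
    obtain ⟨j, hj, rfl⟩ := List.mem_iff_getElem.mp hy
    rw [← pvGetD_eq_getElem heap j hj]
    exact pvRoot_min hh j hj
  -- the first popped value is min(t)
  have ha : (pvHeappop heap).1 = pvMinv t := by
    rw [pvMinv_eq_root hperm hne hh]
    have h1 := hmin1 _ hroot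
    have h2 := hmr _ hmemroot
    omega
  have hat : (pvHeappop heap).1 ∈ t := hperm.mem_iff.mp hmemroot
  have hremove1 : pvRem t (pvMinv t) = t.erase ((pvHeappop heap).1) := by
    rw [pvRem, ← ha, PySem.List.remove?_eq_some_erase t _ hat]; rfl
  have hperm1' : (pvHeappop heap).2.Perm (t.erase ((pvHeappop heap).1)) :=
    (hperm1.trans (hperm.trans (List.perm_cons_erase hat))).cons_inv
  -- the second popped value is min of the once-reduced list
  have hb : (pvHeappop (pvHeappop heap).2).1 = pvMinv (pvRem t (pvMinv t)) := by
    rw [hremove1, pvMinv_eq_root hperm1' hne1 hh1]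
    have hroot2 : (pvHeappop heap).2.getD 0 0 ∈ (pvHeappop heap).2 := by
      have h0 : 0 < (pvHeappop heap).2.length := by omega
      rw [pvGetD_eq_getElem _ 0 h0]; exact List.getElem_mem h0
    have hmem2 : (pvHeappop (pvHeappop heap).2).1 ∈ (pvHeappop heap).2 :=
      hperm2.mem_iff.mp List.mem_cons_self
    have hmr2 : ∀ y ∈ (pvHeappop heap).2, (pvHeappop heap).2.getD 0 0 ≤ y := by
      intro y hy
      obtain ⟨j, hj, rfl⟩ := List.mem_iff_getElem.mp hy
      rw [← pvGetD_eq_getElem _ j hj]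
      exact pvRoot_min hh1 j hj
    have h1 := hmin2 _ hroot2
    have h2 := hmr2 _ hmem2
    omega
  have hbt : (pvHeappop (pvHeappop heap).2).1 ∈ t.erase ((pvHeappop heap).1) :=
    hperm1'.mem_iff.mp (hperm2.mem_iff.mp List.mem_cons_self)
  have hremove2 : pvRem (pvRem t (pvMinv t)) (pvMinv (pvRem t (pvMinv t)))
      = (t.erase ((pvHeappop heap).1)).erase ((pvHeappop (pvHeappop heap).2).1) := by
    rw [pvRem, ← hb, hremove1, PySem.List.remove?_eq_some_erase _ _ hbt]; rfl
  have hperm2' : (pvHeappop (pvHeappop heap).2).2.Perm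
      ((t.erase ((pvHeappop heap).1)).erase ((pvHeappop (pvHeappop heap).2).1)) :=
    (hperm2.trans (hperm1'.trans (List.perm_cons_erase hbt))).cons_inv
  refine ⟨hh3, ?_, ?_⟩
  · rw [pvNextA, pvNextB, hremove2, ← hb, ← ha]
    refine hperm3.trans ?_
    exact (List.Perm.cons _ hperm2').trans (List.perm_append_singleton _ _).symm
  · rw [pvNextA, pvHeappush_length]; omega

theorem pvMain (fa : Nat) : ∀ (fb : Nat) (heap t : List Int) (answer K : Int),
    heap.length ≤ fa → t.length ≤ fb →
    pvHeapOn 0 heap → heap.Perm t → heap ≠ [] →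
    (if (pvLoopAF fa K heap answer).2.getD 0 0 < K then -1 else (pvLoopAF fa K heap answer).1) =
      pvLoopBF fb K t answer := by
  induction fa with
  | zero =>
    intro fb heap t answer K hfa _ _ _ hne
    have := List.length_pos_iff.mpr hne
    omega
  | succ fa ih =>
  intro fb heap t answer K hfa hfb hh hperm hne
  have hmin : pvMinv t = heap.getD 0 0 := pvMinv_eq_root hperm hne hh
  have htlen : t.length = heap.length := hperm.length_eq.symm
  cases fb with
  | zero =>
    have := List.length_pos_iff.mpr hne
    omega
  | succ fb =>
  rw [pvLoopA_eq, pvLoopB_eq]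
  by_cases hc1 : 2 ≤ heap.length
  · by_cases hm : heap.getD 0 0 < K
    · -- one combining round on both sides
      rw [if_pos hc1, if_pos hm]
      obtain ⟨hh3, hperm3, hlen3⟩ := pvRound hc1 hh hperm
      have hne3 : pvNextA heap ≠ [] := by
        intro hc; rw [hc] at hlen3; simp at hlen3; omega
      by_cases hstop : (pvNextA heap).getD 0 0 ≥ K
      · rw [if_pos hstop]
        obtain ⟨fb2, rfl⟩ : ∃ fb2, fb = fb2 + 1 := ⟨fb - 1, by omega⟩
        show (if (pvNextA heap).getD 0 0 < K then (-1 : Int) else answer + 1) = _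
        rw [if_neg (show ¬((pvNextA heap).getD 0 0 < K) by omega),
          if_pos (show 2 ≤ t.length ∧ pvMinv t < K by rw [hmin, htlen]; exact ⟨hc1, hm⟩),
          pvLoopB_eq,
          if_neg (show ¬(2 ≤ (pvNextB t).length ∧ pvMinv (pvNextB t) < K) by
            rw [pvMinv_eq_root hperm3 hne3 hh3]; intro hcc; omega),
          if_neg (show ¬(pvMinv (pvNextB t) < K) by
            rw [pvMinv_eq_root hperm3 hne3 hh3]; omega)]
      · rw [if_neg hstop,
          if_pos (show 2 ≤ t.length ∧ pvMinv t < K by rw [hmin, htlen]; exact ⟨hc1, hm⟩)]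
        have hblen : (pvNextB t).length = (pvNextA heap).length := hperm3.length_eq.symm
        exact ih fb _ _ (answer + 1) K (by omega) (by omega) hh3 hperm3 hne3
    · rw [if_pos hc1, if_neg hm]
      show (if heap.getD 0 0 < K then (-1 : Int) else answer) = _
      rw [if_neg hm,
        if_neg (show ¬(2 ≤ t.length ∧ pvMinv t < K) by rw [hmin]; intro hcc; exact hm hcc.2),
        if_neg (show ¬(pvMinv t < K) by rw [hmin]; exact hm)]
  · rw [if_neg hc1,
      if_neg (show ¬(2 ≤ t.length ∧ pvMinv t < K) by rw [htlen]; intro hcc; exact hc1 hcc.1)]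
    show (if heap.getD 0 0 < K then (-1 : Int) else answer) = _
    by_cases hm : heap.getD 0 0 < K
    · rw [if_pos hm, if_pos (show pvMinv t < K by rw [hmin]; exact hm)]
    · rw [if_neg hm, if_neg (show ¬(pvMinv t < K) by rw [hmin]; exact hm)]

-- ===== VERDICT (by name: the statement is the Claim_ definition above) =====
theorem solution_spec : Claim_equal_solution := by
  intro s K _hdom hpre
  unfold Spec_solution solution solution_alt
  obtain ⟨hh, hperm⟩ := pvHeapify_spec s
  have hlen : (pvHeapify s).length = s.length := hperm.length_eq
  have hne : pvHeapify s ≠ [] := by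
    intro hc; rw [hc] at hlen; exact hpre (List.length_eq_zero_iff.mp hlen.symm)
  simpa using pvMain (pvHeapify s).length s.length (pvHeapify s) s 0 K (le_refl _)
    (le_refl _) hh hperm hne
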